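-- pv_equiv track=rewrite | github.com/platelminto/trakt-auto-downloader | auto_downloader.py | generate_filters
-- ===== SOURCE A (Python) =====
-- def generate_filters(named_filters):
--     filters = list()
--     for index, _ in enumerate(named_filters):
--         filter = dict()
--         for filter_name, filter_value in named_filters[0:len(named_filters)-index]:
--             if filter_value:
--                 filter.setdefault(filter_name, []).append(filter_value)
--         filters.append(filter)
--
--     return filters
-- ===== SOURCE B (Python) =====
-- def generate_filters(named_filters):
--     running = {}
--     snapshots = []
--     for name, value in named_filters:
--         if value:
--             running.setdefault(name, []).append(value)
--         snapshots.append({k: v[:] for k, v in running.items()})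
--     return snapshots[::-1]
-- ===== Notes on version B (the rewrite author's own statement) =====
-- stated objective: alternative
-- what changed: Instead of rebuilding each prefix grouping from scratch with a nested rescan of the list, B makes one forward pass maintaining a single running grouping dict, snapshots it (per-list copies) after each element, and returns the snapshots reversed.
import Mathlib
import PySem

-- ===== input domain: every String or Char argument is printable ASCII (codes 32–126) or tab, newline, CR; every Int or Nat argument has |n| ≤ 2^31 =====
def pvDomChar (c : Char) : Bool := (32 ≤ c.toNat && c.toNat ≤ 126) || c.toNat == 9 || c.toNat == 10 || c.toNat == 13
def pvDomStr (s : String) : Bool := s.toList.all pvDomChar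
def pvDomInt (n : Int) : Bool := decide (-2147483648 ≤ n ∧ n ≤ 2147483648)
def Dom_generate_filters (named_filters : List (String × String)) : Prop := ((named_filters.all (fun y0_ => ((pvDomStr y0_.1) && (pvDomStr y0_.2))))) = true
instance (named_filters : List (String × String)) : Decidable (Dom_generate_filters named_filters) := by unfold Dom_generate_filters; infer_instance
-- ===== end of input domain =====

-- B replaces A's per-index prefix rescans by one forward pass with snapshots, reversed at the end (alternative decomposition, same asymptotic cost).

-- ===== PORT A =====
-- the shared inner step: 'if filter_value: filter.setdefault(filter_name, []).append(filter_value)'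
def gfStep (d : PySem.Dict String (List String)) (p : String × String) : PySem.Dict String (List String) :=
  if p.2 ≠ "" then d.modify p.1 [] (· ++ [p.2]) else d

def generate_filters (named_filters : List (String × String)) : List (List (String × List String)) :=
  (PySem.List.enumerate named_filters).foldl
    (fun filters ix =>
      filters ++ [((PySem.List.slice named_filters (some 0) (some ((named_filters.length : Int) - ix.1))).foldl gfStep PySem.Dict.empty).items])
    []

-- ===== PORT B =====
def generate_filters_alt (named_filters : List (String × String)) : List (List (String × List String)) :=
  (named_filters.foldl
    (fun (st : PySem.Dict String (List String) × List (List (String × List String))) p =>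
      let d := gfStep st.1 p
      (d, st.2 ++ [d.items]))
    (PySem.Dict.empty, [])).2.reverse

-- ===== PRECONDITION & SPEC =====
def Spec_generate_filters (named_filters : List (String × String)) (out : List (List (String × List String))) : Prop := out = generate_filters_alt named_filters
instance (named_filters : List (String × String)) (out : List (List (String × List String))) : Decidable (Spec_generate_filters named_filters out) := by unfold Spec_generate_filters; infer_instance

-- ===== CLAIM (what is proved, stated in full; the proofs are below) =====
def Claim_equal_generate_filters : Prop := ∀ (named_filters : List (String × String)), Dom_generate_filters named_filters → Spec_generate_filters named_filters (generate_filters named_filters)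

-- ===== LEMMAS AND PROOFS =====

-- the snapshot list of B, written structurally
def gfSnap (d : PySem.Dict String (List String)) : List (String × String) → List (List (String × List String))
  | [] => []
  | p :: r => (gfStep d p).items :: gfSnap (gfStep d p) r

theorem gfSnap_length (d : PySem.Dict String (List String)) (l : List (String × String)) :
    (gfSnap d l).length = l.length := by
  induction l generalizing d with
  | nil => rfl
  | cons p r ih => simp [gfSnap, ih]

theorem gfSnap_getElem (l : List (String × String)) (d : PySem.Dict String (List String))
    (i : Nat) (hi : i < (gfSnap d l).length) :
    (gfSnap d l)[i] = ((l.take (i + 1)).foldl gfStep d).items := by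
  induction l generalizing d i with
  | nil => simp [gfSnap] at hi
  | cons p r ih =>
    cases i with
    | zero => simp [gfSnap]
    | succ j =>
      simp only [gfSnap, List.getElem_cons_succ, List.take_succ_cons, List.foldl_cons]
      exact ih (gfStep d p) j (by simpa [gfSnap] using hi)

theorem gfB_foldl (l : List (String × String)) (d : PySem.Dict String (List String))
    (s : List (List (String × List String))) :
    (l.foldl
      (fun (st : PySem.Dict String (List String) × List (List (String × List String))) p =>
        let d := gfStep st.1 p
        (d, st.2 ++ [d.items])) (d, s)).2 = s ++ gfSnap d l := by
  induction l generalizing d s with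
  | nil => simp [gfSnap]
  | cons p r ih => simp [gfSnap, ih]

theorem gfA_eq_map (l : List (String × String)) :
    generate_filters l = (PySem.List.enumerate l).map
      (fun ix => ((PySem.List.slice l (some 0) (some ((l.length : Int) - ix.1))).foldl gfStep PySem.Dict.empty).items) := by
  unfold generate_filters
  exact PySem.List.foldl_append_singleton_eq_map _ _ _

theorem generate_filters_spec : Claim_equal_generate_filters := by
  intro l _
  unfold Spec_generate_filters generate_filters_alt
  rw [gfB_foldl, gfA_eq_map, List.nil_append]
  apply List.ext_getElem
  · simp [gfSnap_length, PySem.List.length_enumerate]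
  · intro k h1 h2
    have hk : k < l.length := by simpa [PySem.List.length_enumerate] using h1
    rw [List.getElem_map, PySem.List.getElem_enumerate]
    rw [List.getElem_reverse, gfSnap_getElem]
    · have hlen : (gfSnap PySem.Dict.empty l).length = l.length := gfSnap_length _ _
      have h3 : (gfSnap PySem.Dict.empty l).length - 1 - k + 1 = l.length - k := by omega
      rw [h3]
      have hsl : PySem.List.slice l (some 0) (some ((l.length : Int) - (0 + (k : Int)))) = l.take (l.length - k) := by
        have : ((l.length : Int) - (0 + (k : Int))) = ((l.length - k : Nat) : Int) := by
          omega
        rw [this]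
        simp [PySem.List.slice_zero_start, PySem.List.slice_to_natCast]
      rw [hsl]
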